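-- pv_equiv track=rewrite | github.com/Pug-coder/Algorithms-and-Data-Structures | FormalLanguagesTheory/lab2/epsilon_deletion.py | make_list_of_comb
-- ===== SOURCE A (Python) =====
-- from itertools import product
--
-- def make_list_of_comb(l):
--     pos = [i for i, e in enumerate(l) if e == 1]
--     ans = []
--     new = [0 for i in range(len(l)-len(pos))]
--     d = product([0, 1], repeat=len(new))
--
--     for e in d:
--         ans.append(list(e))
--
--     for i in pos:
--         if i != len(l):
--             for j in ans:
--                 j.insert(i,1)
--         else:
--             for j in ans:
--                 j.append(1)
--     return ans
-- ===== SOURCE B (Python) =====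
-- def _go(rest, acc):
--     # recursive backtracking: fixed 1s copied, other positions branch 0 then 1
--     if not rest:
--         return [acc]
--     if rest[0] == 1:
--         return _go(rest[1:], acc + [1])
--     return _go(rest[1:], acc + [0]) + _go(rest[1:], acc + [1])
--
-- def make_list_of_comb(l):
--     return _go(list(l), [])
-- ===== Notes on version B (the rewrite author's own statement) =====
-- stated objective: alternative
-- what changed: Replaces A's two-phase scheme (itertools.product over the free slots, then repeated in-place insertion of 1 at each fixed position into every list) by a single recursive backtracking pass over l that builds each output list left to right, branching 0 then 1 at non-1 positions.
import Mathlib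
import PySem

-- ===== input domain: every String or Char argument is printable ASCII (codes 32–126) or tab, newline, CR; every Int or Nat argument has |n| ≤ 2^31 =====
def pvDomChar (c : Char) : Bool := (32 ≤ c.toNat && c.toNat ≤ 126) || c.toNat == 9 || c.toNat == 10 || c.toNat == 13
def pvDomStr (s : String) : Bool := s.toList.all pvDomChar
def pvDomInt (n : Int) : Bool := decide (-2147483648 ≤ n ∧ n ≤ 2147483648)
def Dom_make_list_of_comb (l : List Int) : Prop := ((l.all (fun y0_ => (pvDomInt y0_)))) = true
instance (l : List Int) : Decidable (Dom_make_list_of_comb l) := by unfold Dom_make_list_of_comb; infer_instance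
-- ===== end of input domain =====

-- B replaces A's product-then-insert two-phase enumeration by one recursive backtracking pass
-- over l (objective: alternative; same output, return value only — A mutates nothing observable).

-- ===== PORT A =====
-- itertools.product([0,1], repeat=n), in product's order (first coordinate varies slowest)
def pvProdRep01 : Nat → List (List Int)
  | 0 => [[]]
  | n + 1 => ([0, 1] : List Int).flatMap (fun b => (pvProdRep01 n).map (b :: ·))

def make_list_of_comb (l : List Int) : List (List Int) :=
  let pos : List Int := ((PySem.List.enumerate l).filter (fun p => p.2 == 1)).map (·.1)
  let ans : List (List Int) := []
  let new : List Int := List.replicate (l.length - pos.length) 0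
  let d := pvProdRep01 new.length
  let ans := d.foldl (fun ans e => ans ++ [e]) ans
  pos.foldl (fun ans i =>
    if i ≠ (l.length : Int) then ans.map (fun j => PySem.List.insert j i 1)
    else ans.map (fun j => j ++ [1])) ans

-- ===== PORT B =====
def pvGo : List Int → List Int → List (List Int)
  | [], acc => [acc]
  | x :: xs, acc =>
    if x = 1 then pvGo xs (acc ++ [1])
    else pvGo xs (acc ++ [0]) ++ pvGo xs (acc ++ [1])

def make_list_of_comb_alt (l : List Int) : List (List Int) := pvGo l []

-- ===== PRECONDITION & SPEC =====
def Spec_make_list_of_comb (l : List Int) (out : List (List Int)) : Prop := out = make_list_of_comb_alt l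
instance (l : List Int) (out : List (List Int)) : Decidable (Spec_make_list_of_comb l out) := by unfold Spec_make_list_of_comb; infer_instance

-- ===== CLAIM (what is proved, stated in full; the proofs are below) =====
def Claim_equal_make_list_of_comb : Prop := ∀ (l : List Int), Dom_make_list_of_comb l → Spec_make_list_of_comb l (make_list_of_comb l)

-- ===== LEMMAS AND PROOFS =====

-- the position list of A, with a general enumerate start
def pvPosS (s : Int) (l : List Int) : List Int :=
  ((PySem.List.enumerate l s).filter (fun p => p.2 == 1)).map (·.1)

-- the insertion fold of A (with the dead `i != len(l)` branch removed)
def pvF (ps : List Int) (L : List (List Int)) : List (List Int) :=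
  ps.foldl (fun ans i => ans.map (fun j => PySem.List.insert j i 1)) L

theorem pvPosS_cons (s : Int) (x : Int) (xs : List Int) :
    pvPosS s (x :: xs) = (if x = 1 then [s] else []) ++ pvPosS (s + 1) xs := by
  simp [pvPosS, PySem.List.enumerate_cons, List.filter_cons]
  split_ifs <;> simp_all

theorem pvPosS_shift (xs : List Int) (s : Int) :
    pvPosS s xs = (pvPosS 0 xs).map (· + s) := by
  induction xs generalizing s with
  | nil => simp [pvPosS, PySem.List.enumerate_nil]
  | cons x xs ih =>
    rw [pvPosS_cons, pvPosS_cons]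
    simp only [zero_add]
    rw [ih (s + 1), ih 1]
    simp only [List.map_append, List.map_map]
    congr 1
    · split_ifs <;> simp
    · congr 1; funext i; simp; ring

theorem pvPosS_mem (l : List Int) (i : Int) (h : i ∈ pvPosS 0 l) :
    0 ≤ i ∧ i < (l.length : Int) := by
  induction l generalizing i with
  | nil => simp [pvPosS, PySem.List.enumerate_nil] at h
  | cons x xs ih =>
    rw [pvPosS_cons] at h
    simp only [zero_add] at h
    rw [pvPosS_shift xs 1] at h
    simp only [List.mem_append, List.mem_map] at h
    rcases h with h | ⟨j, hj, rfl⟩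
    · split_ifs at h
      · simp only [List.mem_singleton] at h
        subst h
        simp only [List.length_cons]
        omega
      · simp at h
    · have := ih j hj
      simp only [List.length_cons]
      omega

theorem pvPosS_len_le (s : Int) (l : List Int) : (pvPosS s l).length ≤ l.length := by
  calc (pvPosS s l).length = ((PySem.List.enumerate l s).filter (fun p => p.2 == 1)).length := by
        simp [pvPosS]
    _ ≤ (PySem.List.enumerate l s).length := List.length_filter_le _ _
    _ = l.length := by simp [PySem.List.length_enumerate]

theorem pvGo_map (xs : List Int) (acc : List Int) :
    pvGo xs acc = (pvGo xs []).map (acc ++ ·) := by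
  induction xs generalizing acc with
  | nil => simp [pvGo]
  | cons x xs ih =>
    simp only [pvGo]
    simp only [List.nil_append]
    split_ifs
    · rw [ih (acc ++ [1]), ih [1]]
      simp [List.map_map, Function.comp_def, List.append_assoc]
    · rw [ih (acc ++ [0]), ih (acc ++ [1]), ih [0], ih [1]]
      simp [List.map_map, Function.comp_def, List.append_assoc]

theorem pvInsert_ge_len (xs : List Int) (i : Int) (h : (xs.length : Int) ≤ i) :
    PySem.List.insert xs i 1 = xs ++ [1] := by
  unfold PySem.List.insert PySem.List.sliceIndices
  have h0 : ¬ i < 0 := by omega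
  simp [h0, min_eq_right h]

theorem pvInsert_cons_succ (c : Int) (t : List Int) (i : Int) (h : 0 ≤ i) :
    PySem.List.insert (c :: t) (i + 1) 1 = c :: PySem.List.insert t i 1 := by
  by_cases hle : i ≤ (t.length : Int)
  · have hi : i = ((i.toNat : Nat) : Int) := by omega
    rw [hi]
    have h1 : ((i.toNat + 1 : Nat) : Int) = (i.toNat : Int) + 1 := by push_cast; ring
    rw [← h1, PySem.List.insert_natCast t i.toNat 1 (by omega),
        PySem.List.insert_natCast (c :: t) (i.toNat + 1) 1 (by simp; omega)]
    simp [List.take_succ_cons, List.drop_succ_cons]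
  · rw [pvInsert_ge_len t i (by omega), pvInsert_ge_len (c :: t) (i + 1) (by simp; omega)]
    simp

theorem pvF_append (ps : List Int) (L1 L2 : List (List Int)) :
    pvF ps (L1 ++ L2) = pvF ps L1 ++ pvF ps L2 := by
  induction ps generalizing L1 L2 with
  | nil => simp [pvF]
  | cons p ps ih =>
    simp only [pvF, List.foldl_cons, List.map_append]
    exact ih _ _

theorem pvF_shift (ps : List Int) (h : ∀ i ∈ ps, 0 ≤ i) (c : Int) (L : List (List Int)) :
    pvF (ps.map (· + 1)) (L.map (c :: ·)) = (pvF ps L).map (c :: ·) := by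
  induction ps generalizing L with
  | nil => simp [pvF]
  | cons p ps ih =>
    simp only [List.map_cons, pvF, List.foldl_cons]
    have hstep : (L.map (c :: ·)).map (fun j => PySem.List.insert j (p + 1) 1)
        = (L.map (fun j => PySem.List.insert j p 1)).map (c :: ·) := by
      simp only [List.map_map]
      exact List.map_congr_left (fun j _ => pvInsert_cons_succ c j p (h p (by simp)))
    rw [hstep]
    exact ih (fun i hi => h i (by simp [hi])) _

theorem pv_core (l : List Int) :
    pvF (pvPosS 0 l) (pvProdRep01 (l.length - (pvPosS 0 l).length)) = pvGo l [] := by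
  induction l with
  | nil => simp [pvPosS, PySem.List.enumerate_nil, pvF, pvProdRep01, pvGo]
  | cons x xs ih =>
    have hnn : ∀ i ∈ pvPosS 0 xs, 0 ≤ i := fun i hi => (pvPosS_mem xs i hi).1
    rw [pvPosS_cons]
    simp only [zero_add]
    rw [pvPosS_shift xs 1]
    by_cases hx : x = 1
    · subst hx
      simp only [if_true]
      have hlen : ((1:Int) :: xs).length - ([ (0:Int) ] ++ (pvPosS 0 xs).map (· + 1)).length
          = xs.length - (pvPosS 0 xs).length := by
        simp
      rw [hlen]
      simp only [List.singleton_append, pvF, List.foldl_cons]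
      have h0 : (pvProdRep01 (xs.length - (pvPosS 0 xs).length)).map
          (fun j => PySem.List.insert j 0 1)
          = (pvProdRep01 (xs.length - (pvPosS 0 xs).length)).map ((1:Int) :: ·) := by
        exact List.map_congr_left (fun j _ => PySem.List.insert_zero j 1)
      rw [h0]
      have hsh := pvF_shift (pvPosS 0 xs) hnn 1 (pvProdRep01 (xs.length - (pvPosS 0 xs).length))
      simp only [pvF] at hsh ih ⊢
      rw [hsh, ih]
      have hg := pvGo_map xs [1]
      simp only [pvGo, if_true, List.nil_append]
      rw [hg]
      simp
    · rw [if_neg hx]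
      have hk : (pvPosS 0 xs).length ≤ xs.length := pvPosS_len_le 0 xs
      have hlen : (x :: xs).length - ([] ++ (pvPosS 0 xs).map (· + 1)).length
          = (xs.length - (pvPosS 0 xs).length) + 1 := by
        simp; omega
      rw [hlen]
      have hprod : pvProdRep01 ((xs.length - (pvPosS 0 xs).length) + 1)
          = (pvProdRep01 (xs.length - (pvPosS 0 xs).length)).map ((0:Int) :: ·)
            ++ (pvProdRep01 (xs.length - (pvPosS 0 xs).length)).map ((1:Int) :: ·) := by
        simp [pvProdRep01, List.flatMap_cons]
      rw [List.nil_append, hprod, pvF_append,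
          pvF_shift (pvPosS 0 xs) hnn 0, pvF_shift (pvPosS 0 xs) hnn 1, ih]
      have hg0 := pvGo_map xs [0]
      have hg1 := pvGo_map xs [1]
      simp only [pvGo, if_neg hx, List.nil_append]
      rw [hg0, hg1]
      simp

theorem pv_foldl_app {α : Type} (d : List α) : d.foldl (fun a e => a ++ [e]) [] = d := by
  have gen : ∀ (d acc : List α), d.foldl (fun a e => a ++ [e]) acc = acc ++ d := by
    intro d
    induction d with
    | nil => simp
    | cons x xs ih => intro acc; simp [ih]
  simpa using gen d []

theorem pv_fold_if (l : List Int) (ps : List Int) (h : ∀ i ∈ ps, i ≠ (l.length : Int))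
    (L : List (List Int)) :
    ps.foldl (fun ans i =>
      if i ≠ (l.length : Int) then ans.map (fun j => PySem.List.insert j i 1)
      else ans.map (fun j => j ++ [1])) L = pvF ps L := by
  induction ps generalizing L with
  | nil => simp [pvF]
  | cons p ps ih =>
    simp only [pvF, List.foldl_cons, if_pos (h p (by simp))]
    exact ih (fun i hi => h i (by simp [hi])) _

-- ===== VERDICT (by name: the statement is the Claim_ definition above) =====
theorem make_list_of_comb_spec : Claim_equal_make_list_of_comb := by
  intro l _
  show _ = _
  unfold make_list_of_comb make_list_of_comb_alt
  simp only [List.length_replicate]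
  rw [pv_foldl_app, pv_fold_if l _ (fun i hi => by
      have := pvPosS_mem l i hi; omega)]
  exact pv_core l
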